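-- pv_equiv track=rewrite | github.com/JH-TT/Coding_Practice | Programmers/Dynamic_P/389480.py | solution
-- ===== SOURCE A (Python) =====
-- from collections import deque
--
-- def solution(info, n, m):
--     q = deque()
--     q.append((0, 0, 0))
--     visit = set() # 훔친 횟수와 a b 흔적 개수가 같은 경우를 제외하기 위한 방문처리
--
--     a_evi = []
--     while q:
--         cnt, a, b = q.popleft()
--
--         if (cnt, a, b) in visit:
--             continue
--
--         if a >= n or b >= m:
--             continue
--
--         if cnt == len(info):
--             a_evi.append(a)
--             continue
--
--         visit.add((cnt, a, b))
--         q.append((cnt + 1, a + info[cnt][0], b))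
--         q.append((cnt + 1, a, b + info[cnt][1]))
--
--     if len(a_evi) == 0 or min(a_evi) >= n:
--         return -1
--
--     return min(a_evi)
-- ===== SOURCE B (Python) =====
-- def solution(info, n, m):
--     # DP per item count: dp maps b (evidence count of type b) -> minimal achievable a,
--     # keeping every partial state inside a < n and b < m.
--     if n <= 0 or m <= 0:
--         return -1
--     dp = {0: 0}
--     for row in info:
--         if not dp:
--             break
--         x, y = row[0], row[1]
--         ndp = {}
--         for b, a in dp.items():
--             na = a + x
--             if na < n and (b not in ndp or na < ndp[b]):
--                 ndp[b] = na
--             nb = b + y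
--             if nb < m and (nb not in ndp or a < ndp[nb]):
--                 ndp[nb] = a
--         dp = ndp
--     if not dp:
--         return -1
--     return min(dp.values())
-- ===== Notes on version B (the rewrite author's own statement) =====
-- stated objective: faster
-- what changed: Replaces the BFS over a deque of (cnt,a,b) states with a visited-set by a per-item dynamic programming dict mapping b to the minimal achievable a (the a dimension is dropped because a smaller a dominates under the a<n bound), taking the min of the final dict's values. Pre_ additionally requires every row of info to have at least 2 entries unless n<=0 or m<=0 (nothing is read then): A raises IndexError on a too-short row it reaches, and rows it never reaches behind a pruned frontier are excluded too although A returns -1 there (B returns -1 as well, see cites).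
-- outside the precondition, e.g. on solution([[1, 1], [9]], 1, 1): A returns -1, B returns -1
import Mathlib
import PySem

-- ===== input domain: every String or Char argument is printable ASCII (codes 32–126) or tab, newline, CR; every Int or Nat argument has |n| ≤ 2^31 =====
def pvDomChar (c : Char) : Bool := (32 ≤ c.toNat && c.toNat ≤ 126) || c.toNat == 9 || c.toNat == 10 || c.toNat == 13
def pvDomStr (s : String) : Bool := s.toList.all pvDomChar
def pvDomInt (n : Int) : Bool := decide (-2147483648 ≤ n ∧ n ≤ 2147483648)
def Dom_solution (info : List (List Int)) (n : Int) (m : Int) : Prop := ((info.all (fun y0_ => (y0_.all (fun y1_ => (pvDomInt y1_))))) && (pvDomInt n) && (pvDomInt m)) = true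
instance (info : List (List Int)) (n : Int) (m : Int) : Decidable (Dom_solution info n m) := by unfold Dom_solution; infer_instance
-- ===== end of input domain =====

-- B replaces A's BFS over a deque of (cnt,a,b) states with a visited set by a per-item DP dict
-- mapping b to the minimal achievable a; measured faster at the largest generated size.

-- ===== PORT A =====
-- info[c][0] / info[c][1]; total with default 0 — Pre_solution guarantees the row is long enough wherever A reads it
def pvRowX (info : List (List Int)) (c : Int) : Int :=
  PySem.List.pyGetD (PySem.List.pyGetD info c []) 0 0
def pvRowY (info : List (List Int)) (c : Int) : Int :=
  PySem.List.pyGetD (PySem.List.pyGetD info c []) 1 0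

-- the while-loop of A; fuel only guards termination (consumed on the branch that grows the queue;
-- pvCost below shows 2 ^ info.length expansions always suffice, so the 0-fuel branch is never taken)
def pvLoopA (info : List (List Int)) (n m : Int) (fuel : Nat)
    (q : List (Int × Int × Int)) (visit : PySem.Set (Int × Int × Int)) (evi : List Int) :
    List Int :=
  match q with
  | [] => evi
  | (c, a, b) :: q' =>
    if (c, a, b) ∈ visit then pvLoopA info n m fuel q' visit evi
    else if n ≤ a ∨ m ≤ b then pvLoopA info n m fuel q' visit evi
    else if c = (info.length : Int) then pvLoopA info n m fuel q' visit (evi ++ [a])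
    else
      match fuel with
      | 0 => evi
      | fuel' + 1 =>
        pvLoopA info n m fuel'
          (q' ++ [(c + 1, a + pvRowX info c, b), (c + 1, a, b + pvRowY info c)])
          (PySem.Set.add visit (c, a, b)) evi
termination_by (fuel, q.length)

def solution (info : List (List Int)) (n : Int) (m : Int) : Int :=
  let evi := pvLoopA info n m (2 ^ info.length) [(0, 0, 0)] PySem.Set.empty []
  match PySem.List.min? evi (fun x => x) with
  | none => -1
  | some v => if n ≤ v then -1 else v

-- ===== PORT B =====
-- 'b not in ndp or v < ndp[b]'
def pvBetter (d : PySem.Dict Int Int) (k v : Int) : Bool :=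
  match d.get? k with
  | none => true
  | some w => decide (v < w)

-- the body of B's inner 'for b, a in dp.items()' loop, for one item p = (b, a)
def pvStepOne (n m x y : Int) (d : PySem.Dict Int Int) (p : Int × Int) : PySem.Dict Int Int :=
  let na := p.2 + x
  let d1 := if na < n ∧ pvBetter d p.1 na = true then d.insert p.1 na else d
  let nb := p.1 + y
  if nb < m ∧ pvBetter d1 nb p.2 = true then d1.insert nb p.2 else d1

-- the inner 'for b, a in dp.items()' loop of B
def pvStepB (n m x y : Int) (dp : PySem.Dict Int Int) : PySem.Dict Int Int :=
  dp.items.foldl (pvStepOne n m x y) PySem.Dict.empty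

-- the 'for row in info' loop of B (with its 'if not dp: break')
def pvLoopB (n m : Int) (rows : List (List Int)) (dp : PySem.Dict Int Int) :
    PySem.Dict Int Int :=
  match rows with
  | [] => dp
  | row :: rest =>
    if dp.items = [] then dp
    else pvLoopB n m rest
      (pvStepB n m (PySem.List.pyGetD row 0 0) (PySem.List.pyGetD row 1 0) dp)

def solution_alt (info : List (List Int)) (n : Int) (m : Int) : Int :=
  if n ≤ 0 ∨ m ≤ 0 then -1
  else
    let dp := pvLoopB n m info ((PySem.Dict.empty).insert 0 0)
    if dp.items = [] then -1
    else
      match PySem.List.min? dp.values (fun x => x) with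
      | none => -1
      | some v => v

-- ===== PRECONDITION & SPEC =====
-- Pre_ excludes info with a row of fewer than 2 entries unless n ≤ 0 or m ≤ 0 (then A reads nothing):
-- A raises IndexError on a short row it reaches; short rows A never reaches (behind a fully pruned
-- frontier, where A still returns -1 and B returns -1 too) are also excluded by this condition.
def Pre_solution (info : List (List Int)) (n : Int) (m : Int) : Prop :=
  n ≤ 0 ∨ m ≤ 0 ∨ ∀ row ∈ info, 2 ≤ row.length
instance (info : List (List Int)) (n : Int) (m : Int) : Decidable (Pre_solution info n m) := by
  unfold Pre_solution; infer_instance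

def pvWitness_solution : List (List Int) × Int × Int := ([[1, 2], [3, 4]], 3, 3)

def Spec_solution (info : List (List Int)) (n : Int) (m : Int) (out : Int) : Prop :=
  out = solution_alt info n m
instance (info : List (List Int)) (n : Int) (m : Int) (out : Int) :
    Decidable (Spec_solution info n m out) := by unfold Spec_solution; infer_instance

-- ===== CLAIM (what is proved, stated in full; the proofs are below) =====
def Claim_equal_solution : Prop :=
  ∀ (info : List (List Int)) (n : Int) (m : Int),
    Dom_solution info n m → Pre_solution info n m →
      Spec_solution info n m (solution info n m)

-- ===== LEMMAS AND PROOFS =====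

-- a state (a, b) passes A's pruning test
def pvPass (n m : Int) (s : Int × Int) : Bool := decide (s.1 < n) && decide (s.2 < m)

-- the two children of a state
def pvKids (x y : Int) (s : Int × Int) : List (Int × Int) :=
  [(s.1 + x, s.2), (s.1, s.2 + y)]

-- rows of info as (x, y) pairs, with A's defaulted reads
def pvRows (info : List (List Int)) : List (Int × Int) :=
  info.map (fun r => (PySem.List.pyGetD r 0 0, PySem.List.pyGetD r 1 0))

-- expansion budget: with p pending states on the current level and q already-pushed children,
-- and L levels of expansion remaining, at most pvCost L p q expansions happen
def pvCost : Nat → Nat → Nat → Nat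
  | 0, _, _ => 0
  | L + 1, p, q => p + pvCost L (q + 2 * p) 0

-- level-structured model of A's loop: rows remaining, states already expanded on this level,
-- pending states of this level, children pushed for the next level
def pvRunL (n m : Int) : List (Int × Int) → List (Int × Int) → List (Int × Int) →
    List (Int × Int) → List Int
  | [], _, [], _ => []
  | _ :: rs, seen, [], next => pvRunL n m rs [] next []
  | [], seen, s :: ps, next =>
    if s ∈ seen then pvRunL n m [] seen ps next
    else if pvPass n m s then s.1 :: pvRunL n m [] seen ps next
    else pvRunL n m [] seen ps next
  | r :: rs, seen, s :: ps, next =>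
    if s ∈ seen then pvRunL n m (r :: rs) seen ps next
    else if pvPass n m s then pvRunL n m (r :: rs) (s :: seen) ps (next ++ pvKids r.1 r.2 s)
    else pvRunL n m (r :: rs) seen ps next
termination_by rows _ pend _ => (rows.length, pend.length)

-- the survivors of one level: filtered and first-occurrence-deduplicated
def pvSurv (n m : Int) (seen : List (Int × Int)) : List (Int × Int) → List (Int × Int)
  | [] => []
  | s :: ps =>
    if s ∈ seen then pvSurv n m seen ps
    else if pvPass n m s then s :: pvSurv n m (s :: seen) ps
    else pvSurv n m seen ps

lemma pvCost_mono : ∀ (L p p' q q' : Nat), p ≤ p' → q ≤ q' →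
    pvCost L p q ≤ pvCost L p' q' := by
  intro L
  induction L with
  | zero => intro p p' q q' _ _; simp [pvCost]
  | succ L ih =>
    intro p p' q q' hp hq
    simp only [pvCost]
    have := ih (q + 2 * p) (q' + 2 * p') 0 0 (by omega) (by omega)
    omega

lemma pvCost_le : ∀ (L p q : Nat), pvCost L p q + (p + q) ≤ (p + q) * 2 ^ L := by
  intro L
  induction L with
  | zero => intro p q; simp [pvCost]
  | succ L ih =>
    intro p q
    simp only [pvCost]
    rw [show q + 2 * p = 2 * p + q from by omega]
    have h := ih (2 * p + q) 0
    rw [Nat.add_zero] at h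
    have h2 : (2 * p + q) * 2 ^ L ≤ (p + q) * 2 ^ (L + 1) := by
      have : 2 * p + q ≤ 2 * (p + q) := by omega
      calc (2 * p + q) * 2 ^ L ≤ 2 * (p + q) * 2 ^ L :=
            Nat.mul_le_mul_right _ this
        _ = (p + q) * 2 ^ (L + 1) := by ring
    omega

lemma pvCost_step (L p q f : Nat) (h : pvCost (L + 1) (p + 1) q ≤ f + 1) :
    pvCost (L + 1) p (q + 2) ≤ f := by
  simp only [pvCost] at h ⊢
  rw [show q + 2 + 2 * p = q + 2 * (p + 1) from by omega]
  omega

lemma pvRows_head (info : List (List Int)) (k : Nat) (r : Int × Int) (rs : List (Int × Int))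
    (h : (pvRows info).drop k = r :: rs) :
    pvRowX info (k : Int) = r.1 ∧ pvRowY info (k : Int) = r.2 := by
  have h0 : (pvRows info)[k]? = some r := by
    have h1 : ((pvRows info).drop k)[0]? = (pvRows info)[k + 0]? := List.getElem?_drop
    rw [h] at h1
    simpa using h1.symm
  rcases (by simpa [pvRows] using h0 :
      ∃ row, info[k]? = some row ∧
        (PySem.List.pyGetD row 0 0, PySem.List.pyGetD row 1 0) = r) with ⟨row, hrow, hr⟩
  constructor <;>
    simp [pvRowX, pvRowY, PySem.List.pyGetD_natCast, List.getD, hrow, ← hr]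

lemma pvLoopA_cons (info : List (List Int)) (n m : Int) (fuel : Nat) (c a b : Int)
    (q' : List (Int × Int × Int)) (visit : PySem.Set (Int × Int × Int)) (evi : List Int) :
    pvLoopA info n m fuel ((c, a, b) :: q') visit evi =
      if (c, a, b) ∈ visit then pvLoopA info n m fuel q' visit evi
      else if n ≤ a ∨ m ≤ b then pvLoopA info n m fuel q' visit evi
      else if c = (info.length : Int) then pvLoopA info n m fuel q' visit (evi ++ [a])
      else
        match fuel with
        | 0 => evi
        | fuel' + 1 =>
          pvLoopA info n m fuel'
            (q' ++ [(c + 1, a + pvRowX info c, b), (c + 1, a, b + pvRowY info c)])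
            (PySem.Set.add visit (c, a, b)) evi := by
  rw [pvLoopA.eq_def]

-- THE A-SIDE BRIDGE
lemma pvLoopA_bridge (info : List (List Int)) (n m : Int) :
    ∀ (rows : List (Int × Int)) (k : Nat), rows = (pvRows info).drop k → k ≤ info.length →
    ∀ (pend seen next : List (Int × Int)) (visit : PySem.Set (Int × Int × Int))
      (evi : List Int) (fuel : Nat),
      (∀ a b : Int, ((k : Int), a, b) ∈ visit ↔ (a, b) ∈ seen) →
      (∀ (c a b : Int), (k : Int) < c → (c, a, b) ∉ visit) →
      (rows = [] → next = []) →
      pvCost (info.length - k) pend.length next.length ≤ fuel →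
      pvLoopA info n m fuel
        (pend.map (fun s => ((k : Int), s.1, s.2)) ++
          next.map (fun s => ((k : Int) + 1, s.1, s.2))) visit evi
      = evi ++ pvRunL n m rows seen pend next := by
  intro rows
  induction rows with
  | nil =>
    intro k hk hkle pend seen next visit evi fuel hv hf hnil hfuel
    have hklen : k = info.length := by
      have := List.drop_eq_nil_iff.mp hk.symm
      simp [pvRows] at this
      omega
    have hnext : next = [] := hnil rfl
    subst hnext
    induction pend generalizing evi with
    | nil => simp [pvLoopA, pvRunL]
    | cons s ps ih =>
      simp only [List.map_cons, List.map_nil, List.append_nil] at ih ⊢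
      rw [pvLoopA_cons]
      by_cases hs : s ∈ seen
      · rw [if_pos (by simpa using (hv s.1 s.2).mpr (by simpa using hs))]
        rw [pvRunL, if_pos hs]
        exact ih evi (by rw [hklen]; simp [pvCost])
      · rw [if_neg (by simpa using fun hmem => hs (by simpa using (hv s.1 s.2).mp hmem))]
        rw [pvRunL, if_neg hs]
        by_cases hp : pvPass n m s = true
        · rw [if_neg (by simp [pvPass] at hp; omega), if_pos (by rw [hklen]),
            if_pos hp]
          rw [ih (evi ++ [s.1]) (by rw [hklen]; simp [pvCost])]
          simp
        · rw [if_pos (by simp [pvPass] at hp; omega), if_neg hp]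
          exact ih evi (by rw [hklen]; simp [pvCost])
  | cons r rs ihrows =>
    intro k hk hkle pend seen next visit evi fuel hv hf hnil hfuel
    have hklt : k < info.length := by
      by_contra hge
      have : (pvRows info).drop k = [] := by
        apply List.drop_eq_nil_iff.mpr
        simp [pvRows]; omega
      rw [this] at hk; exact nomatch hk
    induction pend generalizing seen next visit evi fuel with
    | nil =>
      simp only [List.map_nil, List.nil_append]
      rw [pvRunL]
      have hcast : (fun s : Int × Int => ((k : Int) + 1, s.1, s.2))
          = (fun s : Int × Int => (((k + 1 : Nat) : Int), s.1, s.2)) := by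
        funext s; push_cast; rfl
      rw [hcast, show next.map (fun s : Int × Int => (((k + 1 : Nat) : Int), s.1, s.2))
          = next.map (fun s : Int × Int => (((k + 1 : Nat) : Int), s.1, s.2)) ++
            ([] : List (Int × Int)).map (fun s => (((k + 1 : Nat) : Int) + 1, s.1, s.2)) by simp]
      apply ihrows (k + 1)
      · rw [← List.tail_drop, ← hk]; rfl
      · omega
      · intro a b
        constructor
        · intro hmem
          exact absurd hmem (hf _ a b (by push_cast; omega))
        · intro hmem; exact nomatch hmem
      · intro c a b hc
        exact hf c a b (by push_cast at hc ⊢; omega)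
      · intro _; rfl
      · have h1 : info.length - k = (info.length - (k + 1)) + 1 := by omega
        rw [h1] at hfuel
        simp only [pvCost, List.length_nil, Nat.mul_zero, Nat.add_zero, Nat.zero_add] at hfuel
        simpa using hfuel
    | cons s ps ih =>
      simp only [List.map_cons, List.cons_append] at ih ⊢
      rw [pvLoopA_cons]
      by_cases hs : s ∈ seen
      · rw [if_pos (by simpa using (hv s.1 s.2).mpr (by simpa using hs))]
        rw [pvRunL, if_pos hs]
        apply ih seen next visit evi fuel hv hf hnil
        · apply le_trans _ hfuel
          exact pvCost_mono _ _ _ _ _ (by simp) (le_refl _)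
      · rw [if_neg (by simpa using fun hmem => hs (by simpa using (hv s.1 s.2).mp hmem))]
        rw [pvRunL, if_neg hs]
        by_cases hp : pvPass n m s = true
        · rw [if_neg (by simp [pvPass] at hp; omega),
            if_neg (by intro hcl; exact absurd (by exact_mod_cast hcl) (by omega : ¬ k = info.length)),
            if_pos hp]
          have hLsucc : info.length - k = (info.length - k - 1) + 1 := by omega
          rcases fuel with _ | fuel'
          · exfalso
            rw [hLsucc] at hfuel
            simp only [pvCost, List.length_cons] at hfuel
            omega
          · have hrow := pvRows_head info k r rs hk.symm
            rw [hrow.1, hrow.2]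
            have hq : (ps.map (fun s : Int × Int => ((k : Int), s.1, s.2)) ++
                  next.map (fun s : Int × Int => ((k : Int) + 1, s.1, s.2))) ++
                  [((k : Int) + 1, s.1 + r.1, s.2), ((k : Int) + 1, s.1, s.2 + r.2)]
                = ps.map (fun s : Int × Int => ((k : Int), s.1, s.2)) ++
                  (next ++ [(s.1 + r.1, s.2), (s.1, s.2 + r.2)]).map
                    (fun s : Int × Int => ((k : Int) + 1, s.1, s.2)) := by
              simp
            rw [hq]
            change pvLoopA info n m fuel' _ _ _ = _
            rw [ih (s :: seen) (next ++ [(s.1 + r.1, s.2), (s.1, s.2 + r.2)])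
                (PySem.Set.add visit ((k : Int), s.1, s.2)) evi fuel'
                ?_ ?_ (fun h => nomatch h) ?_]
            · rfl
            · intro a b
              rw [PySem.Set.mem_add]
              constructor
              · rintro (hmem | heq)
                · exact List.mem_cons_of_mem _ ((hv a b).mp hmem)
                · have : (a, b) = s := by
                    have h1 := congrArg (fun t : Int × Int × Int => t.2) heq
                    simpa using h1
                  simp [this]
              · intro hmem
                rcases List.mem_cons.mp hmem with heq | hmem
                · right; rw [heq]
                · left; exact (hv a b).mpr hmem
            · intro c a b hc
              rw [PySem.Set.mem_add]
              rintro (hmem | heq)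
              · exact hf c a b hc hmem
              · have : c = (k : Int) := by
                  have h1 := congrArg (fun t : Int × Int × Int => t.1) heq
                  simpa using h1
                omega
            · have hlen2 : (next ++ [(s.1 + r.1, s.2), (s.1, s.2 + r.2)]).length
                  = next.length + 2 := by simp
              rw [hlen2, hLsucc]
              rw [hLsucc, List.length_cons] at hfuel
              exact pvCost_step _ _ _ _ hfuel
        · rw [if_pos (by simp [pvPass] at hp; omega), if_neg hp]
          apply ih seen next visit evi fuel hv hf hnil
          · apply le_trans _ hfuel
            exact pvCost_mono _ _ _ _ _ (by simp) (le_refl _)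

-- ---------- option-min machinery ----------
def pvOmin : Option Int → Option Int → Option Int
  | none, o => o
  | some v, none => some v
  | some v, some w => some (min v w)

def pvCand1 (n x : Int) : Option Int → Option Int
  | none => none
  | some v => if v + x < n then some (v + x) else none

def pvCand2 (m b : Int) : Option Int → Option Int
  | none => none
  | some v => if b < m then some v else none

-- minimal a among states of S with second component b
def pvGMin (S : List (Int × Int)) (b : Int) : Option Int :=
  ((S.filter (fun s => s.2 = b)).map (fun s => s.1)).min?

-- children of one level's survivors
def pvNextP (n m x y : Int) (pend : List (Int × Int)) : List (Int × Int) :=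
  (pvSurv n m [] pend).flatMap (pvKids x y)

-- the pending list after consuming all rows
def pvPendAfter (n m : Int) : List (Int × Int) → List (Int × Int) → List (Int × Int)
  | [], pend => pend
  | r :: rs, pend => pvPendAfter n m rs (pvNextP n m r.1 r.2 pend)

-- first-match lookup on an item list
def pvLk : List (Int × Int) → Int → Option Int
  | [], _ => none
  | (k, v) :: rest, b => if k = b then some v else pvLk rest b

-- per-key contributions of B's inner loop over an item list
def pvContr (n m x y : Int) : List (Int × Int) → Int → Option Int
  | [], _ => none
  | (bb, aa) :: rest, b =>
    pvOmin
      (pvOmin (if bb = b ∧ aa + x < n then some (aa + x) else none)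
              (if bb + y = b ∧ b < m then some aa else none))
      (pvContr n m x y rest b)

lemma pymin_id (l : List Int) : PySem.List.min? l (fun x => x) = l.min? := by
  cases hl : PySem.List.min? l (fun x => x) with
  | none =>
    rw [PySem.List.min?_eq_none_iff] at hl
    subst hl; rfl
  | some v =>
    have hm := PySem.List.min?_mem hl
    have hb := PySem.List.min?_isMin hl
    exact (List.min?_eq_some_iff_subtype.mpr ⟨hm, hb⟩).symm

lemma pvOmin_assoc (o1 o2 o3 : Option Int) :
    pvOmin (pvOmin o1 o2) o3 = pvOmin o1 (pvOmin o2 o3) := by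
  cases o1 <;> cases o2 <;> cases o3 <;> simp [pvOmin, min_assoc]

-- ---------- pvRunL structure ----------
lemma pvRunL_unf_nn (n m : Int) (seen next : List (Int × Int)) :
    pvRunL n m [] seen [] next = [] := by
  rw [pvRunL.eq_def]

lemma pvRunL_unf_rn (n m : Int) (r : Int × Int) (rs seen next : List (Int × Int)) :
    pvRunL n m (r :: rs) seen [] next = pvRunL n m rs [] next [] := by
  rw [pvRunL.eq_def]

lemma pvRunL_unf_nc (n m : Int) (s : Int × Int) (ps seen next : List (Int × Int)) :
    pvRunL n m [] seen (s :: ps) next =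
      if s ∈ seen then pvRunL n m [] seen ps next
      else if pvPass n m s then s.1 :: pvRunL n m [] seen ps next
      else pvRunL n m [] seen ps next := by
  rw [pvRunL.eq_def]

lemma pvRunL_unf_cc (n m : Int) (r : Int × Int) (rs : List (Int × Int)) (s : Int × Int)
    (ps seen next : List (Int × Int)) :
    pvRunL n m (r :: rs) seen (s :: ps) next =
      if s ∈ seen then pvRunL n m (r :: rs) seen ps next
      else if pvPass n m s then pvRunL n m (r :: rs) (s :: seen) ps (next ++ pvKids r.1 r.2 s)
      else pvRunL n m (r :: rs) seen ps next := by
  rw [pvRunL.eq_def]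

lemma pvRunL_final (n m : Int) :
    ∀ (pend seen next : List (Int × Int)),
      pvRunL n m [] seen pend next =
        (pend.filter (fun s => !(decide (s ∈ seen)) && pvPass n m s)).map (fun s => s.1) := by
  intro pend
  induction pend with
  | nil => intro seen next; simp [pvRunL_unf_nn]
  | cons p ps ih =>
    intro seen next
    rw [pvRunL_unf_nc]
    by_cases hs : p ∈ seen
    · rw [if_pos hs, ih]
      simp [hs]
    · rw [if_neg hs]
      by_cases hp : pvPass n m p = true
      · rw [if_pos hp, ih]
        simp [hs, hp]
      · rw [if_neg hp, ih]
        simp [hs, hp]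

lemma pvRunL_step (n m : Int) (r : Int × Int) (rs : List (Int × Int)) :
    ∀ (pend seen next : List (Int × Int)),
      pvRunL n m (r :: rs) seen pend next =
        pvRunL n m rs [] (next ++ (pvSurv n m seen pend).flatMap (pvKids r.1 r.2)) [] := by
  intro pend
  induction pend with
  | nil => intro seen next; rw [pvRunL_unf_rn]; simp [pvSurv]
  | cons p ps ih =>
    intro seen next
    rw [pvRunL_unf_cc, pvSurv]
    by_cases hs : p ∈ seen
    · rw [if_pos hs, if_pos hs, ih]
    · rw [if_neg hs, if_neg hs]
      by_cases hp : pvPass n m p = true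
      · rw [if_pos hp, if_pos hp, ih]
        simp [List.append_assoc]
      · rw [if_neg hp, if_neg hp, ih]

lemma pvRunL_full (n m : Int) :
    ∀ (rows : List (Int × Int)) (pend : List (Int × Int)),
      pvRunL n m rows [] pend [] =
        ((pvPendAfter n m rows pend).filter (pvPass n m)).map (fun s => s.1) := by
  intro rows
  induction rows with
  | nil =>
    intro pend
    simp [pvRunL_final, pvPendAfter]
  | cons r rs ih =>
    intro pend
    rw [pvRunL_step, pvPendAfter]
    rw [show ([] : List (Int × Int)) ++ (pvSurv n m [] pend).flatMap (pvKids r.1 r.2)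
        = pvNextP n m r.1 r.2 pend from by simp [pvNextP]]
    exact ih _

-- ---------- survivors ----------
lemma mem_pvSurv (n m : Int) :
    ∀ (pend seen : List (Int × Int)) (s : Int × Int),
      s ∈ pvSurv n m seen pend ↔ s ∉ seen ∧ s ∈ pend ∧ pvPass n m s = true := by
  intro pend
  induction pend with
  | nil => intro seen s; simp [pvSurv]
  | cons p ps ih =>
    intro seen s
    rw [pvSurv]
    by_cases hs : p ∈ seen
    · rw [if_pos hs, ih]
      constructor
      · rintro ⟨h1, h2, h3⟩
        exact ⟨h1, List.mem_cons_of_mem _ h2, h3⟩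
      · rintro ⟨h1, h2, h3⟩
        rcases List.mem_cons.mp h2 with rfl | h2
        · exact absurd hs h1
        · exact ⟨h1, h2, h3⟩
    · rw [if_neg hs]
      by_cases hp : pvPass n m p = true
      · rw [if_pos hp]
        constructor
        · intro h
          rcases List.mem_cons.mp h with rfl | h
          · exact ⟨hs, List.mem_cons_self, hp⟩
          · rcases (ih (p :: seen) s).mp h with ⟨h1, h2, h3⟩
            refine ⟨fun hv => h1 (List.mem_cons_of_mem _ hv), List.mem_cons_of_mem _ h2, h3⟩
        · rintro ⟨h1, h2, h3⟩
          rcases List.mem_cons.mp h2 with rfl | h2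
          · exact List.mem_cons_self
          · by_cases hsp : s = p
            · subst hsp; exact List.mem_cons_self
            · exact List.mem_cons_of_mem _ ((ih (p :: seen) s).mpr
                ⟨by simp [hsp, h1], h2, h3⟩)
      · rw [if_neg hp, ih]
        constructor
        · rintro ⟨h1, h2, h3⟩
          exact ⟨h1, List.mem_cons_of_mem _ h2, h3⟩
        · rintro ⟨h1, h2, h3⟩
          rcases List.mem_cons.mp h2 with rfl | h2
          · exact absurd h3 (by simp [hp])
          · exact ⟨h1, h2, h3⟩

lemma pvSurv_nil (n m : Int) (pend : List (Int × Int))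
    (h : pend.filter (pvPass n m) = []) (seen : List (Int × Int)) :
    pvSurv n m seen pend = [] := by
  apply List.eq_nil_iff_forall_not_mem.mpr
  intro s hsmem
  rcases (mem_pvSurv n m pend seen s).mp hsmem with ⟨_, h2, h3⟩
  have : s ∈ pend.filter (pvPass n m) := List.mem_filter.mpr ⟨h2, h3⟩
  rw [h] at this
  exact nomatch this

lemma pvPendAfter_nil (n m : Int) :
    ∀ (rows : List (Int × Int)) (pend : List (Int × Int)),
      pend.filter (pvPass n m) = [] →
      (pvPendAfter n m rows pend).filter (pvPass n m) = [] := by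
  intro rows
  induction rows with
  | nil => intro pend h; rw [pvPendAfter]; exact h
  | cons r rs ih =>
    intro pend h
    rw [pvPendAfter]
    apply ih
    rw [pvNextP, pvSurv_nil n m pend h]
    simp

lemma mem_pvGroup (S : List (Int × Int)) (v c : Int) :
    v ∈ (S.filter (fun s => s.2 = c)).map (fun s => s.1) ↔ (v, c) ∈ S := by
  simp only [List.mem_map, List.mem_filter, decide_eq_true_eq]
  constructor
  · rintro ⟨s, ⟨hS, hc⟩, h1⟩
    have hs : s = (v, c) := by cases s; simp_all
    rwa [hs] at hS
  · intro h
    exact ⟨(v, c), ⟨h, by simp⟩, rfl⟩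

lemma pvGMin_none_iff (S : List (Int × Int)) (b : Int) :
    pvGMin S b = none ↔ ∀ a, (a, b) ∉ S := by
  rw [pvGMin, List.min?_eq_none_iff, List.eq_nil_iff_forall_not_mem]
  simp only [mem_pvGroup]

lemma pvGMin_some_iff (S : List (Int × Int)) (b v : Int) :
    pvGMin S b = some v ↔ (v, b) ∈ S ∧ ∀ a, (a, b) ∈ S → v ≤ a := by
  rw [pvGMin, List.min?_eq_some_iff_subtype]
  simp only [mem_pvGroup]

-- ---------- the dominance transition ----------
lemma pvGMin_next (n m x y : Int) (pend : List (Int × Int)) (b : Int) :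
    pvGMin ((pvNextP n m x y pend).filter (pvPass n m)) b =
      pvOmin (pvCand1 n x (pvGMin (pend.filter (pvPass n m)) b))
             (pvCand2 m b (pvGMin (pend.filter (pvPass n m)) (b - y))) := by
  set G := pend.filter (pvPass n m) with hG
  set F' := (pvNextP n m x y pend).filter (pvPass n m) with hF
  have hF' : ∀ t : Int × Int, t ∈ F' ↔
      (pvPass n m t = true ∧ ∃ s, s ∈ G ∧ (t = (s.1 + x, s.2) ∨ t = (s.1, s.2 + y))) := by
    intro t
    rw [hF, hG]
    simp only [List.mem_filter, pvNextP, List.mem_flatMap, mem_pvSurv, pvKids,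
      List.mem_cons, List.not_mem_nil, not_false_iff, true_and, List.mem_singleton]
    constructor
    · rintro ⟨⟨s, ⟨hsp, hss⟩, ht⟩, hpt⟩
      exact ⟨hpt, s, ⟨hsp, hss⟩, by tauto⟩
    · rintro ⟨hpt, s, ⟨hsp, hss⟩, ht⟩
      exact ⟨⟨s, ⟨hsp, hss⟩, by tauto⟩, hpt⟩
  -- pass facts for G members
  have hpp : ∀ (a c : Int), pvPass n m (a, c) = true → a < n ∧ c < m := by
    intro a c h; simpa [pvPass] using h
  have hGpass : ∀ s : Int × Int, s ∈ G → s.1 < n ∧ s.2 < m := by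
    intro s hs
    rcases List.mem_filter.mp hs with ⟨_, hp⟩
    simpa [pvPass] using hp
  cases co1 : pvGMin G b with
  | none =>
    have hno1 : ∀ a, (a, b) ∉ G := (pvGMin_none_iff G b).mp co1
    cases co2 : pvGMin G (b - y) with
    | none =>
      have hno2 : ∀ a, (a, b - y) ∉ G := (pvGMin_none_iff G (b - y)).mp co2
      simp only [pvCand1, pvCand2, pvOmin]
      rw [pvGMin_none_iff]
      intro a ha
      rcases (hF' (a, b)).mp ha with ⟨hpt, s, hsG, hch | hch⟩
      · have h2 : s.2 = b := (congrArg Prod.snd hch).symm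
        exact hno1 s.1 (by rw [← h2]; exact hsG)
      · have h2 : s.2 = b - y := by
          have := (congrArg Prod.snd hch).symm
          simp at this; omega
        exact hno2 s.1 (by rw [← h2]; exact hsG)
    | some v2 =>
      have hm2 := (pvGMin_some_iff G (b - y) v2).mp co2
      by_cases hbm : b < m
      · simp only [pvCand1, pvCand2, pvOmin, if_pos hbm]
        rw [pvGMin_some_iff]
        constructor
        · rw [hF' (v2, b)]
          refine ⟨by simp [pvPass, hbm, (hGpass _ hm2.1).1], (v2, b - y), hm2.1, Or.inr (by simp)⟩
        · intro a ha
          rcases (hF' (a, b)).mp ha with ⟨hpt, s, hsG, hch | hch⟩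
          · have h2 : s.2 = b := (congrArg Prod.snd hch).symm
            exact absurd (by rw [← h2]; exact hsG) (hno1 s.1)
          · have h2 : s.2 = b - y := by
              have := (congrArg Prod.snd hch).symm; simp at this; omega
            have h1 : a = s.1 := by
              have := (congrArg Prod.fst hch); simpa using this
            rw [h1]
            exact hm2.2 s.1 (by rw [← h2]; exact hsG)
      · simp only [pvCand1, pvCand2, pvOmin, if_neg hbm]
        rw [pvGMin_none_iff]
        intro a ha
        rcases (hF' (a, b)).mp ha with ⟨hpt, s, hsG, hch | hch⟩
        · have h2 : s.2 = b := (congrArg Prod.snd hch).symm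
          exact absurd (by rw [← h2]; exact hsG) (hno1 s.1)
        · have hpb : b < m := (hpp a b hpt).2
          exact hbm hpb
  | some v1 =>
    have hm1 := (pvGMin_some_iff G b v1).mp co1
    -- common bound for first-kind children
    have hbnd1 : ∀ (a : Int) (s : Int × Int), s ∈ G → (a, b) = (s.1 + x, s.2) → v1 + x ≤ a := by
      intro a s hsG hch
      have h2 : s.2 = b := (congrArg Prod.snd hch).symm
      have h1 : a = s.1 + x := by simpa using congrArg Prod.fst hch
      have := hm1.2 s.1 (by rw [← h2]; exact hsG)
      omega
    cases co2 : pvGMin G (b - y) with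
    | none =>
      have hno2 : ∀ a, (a, b - y) ∉ G := (pvGMin_none_iff G (b - y)).mp co2
      by_cases hv1 : v1 + x < n
      · simp only [pvCand1, pvCand2, pvOmin, if_pos hv1]
        rw [pvGMin_some_iff]
        constructor
        · rw [hF' (v1 + x, b)]
          exact ⟨by simp [pvPass, hv1, (hGpass _ hm1.1).2], (v1, b), hm1.1, Or.inl rfl⟩
        · intro a ha
          rcases (hF' (a, b)).mp ha with ⟨hpt, s, hsG, hch | hch⟩
          · exact hbnd1 a s hsG hch
          · have h2 : s.2 = b - y := by
              have := (congrArg Prod.snd hch).symm; simp at this; omega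
            exact absurd (by rw [← h2]; exact hsG) (hno2 s.1)
      · simp only [pvCand1, pvCand2, pvOmin, if_neg hv1]
        rw [pvGMin_none_iff]
        intro a ha
        rcases (hF' (a, b)).mp ha with ⟨hpt, s, hsG, hch | hch⟩
        · have hpa : a < n := (hpp a b hpt).1
          have := hbnd1 a s hsG hch
          omega
        · have h2 : s.2 = b - y := by
            have := (congrArg Prod.snd hch).symm; simp at this; omega
          exact absurd (by rw [← h2]; exact hsG) (hno2 s.1)
    | some v2 =>
      have hm2 := (pvGMin_some_iff G (b - y) v2).mp co2
      have hbnd2 : ∀ (a : Int) (s : Int × Int), s ∈ G → (a, b) = (s.1, s.2 + y) → v2 ≤ a := by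
        intro a s hsG hch
        have h2 : s.2 = b - y := by
          have := (congrArg Prod.snd hch).symm; simp at this; omega
        have h1 : a = s.1 := by simpa using congrArg Prod.fst hch
        rw [h1]
        exact hm2.2 s.1 (by rw [← h2]; exact hsG)
      by_cases hv1 : v1 + x < n
      · by_cases hbm : b < m
        · simp only [pvCand1, pvCand2, pvOmin, if_pos hv1, if_pos hbm]
          rw [pvGMin_some_iff]
          constructor
          · rcases le_total (v1 + x) v2 with hle | hle
            · rw [min_eq_left hle, hF' (v1 + x, b)]
              exact ⟨by simp [pvPass, hv1, (hGpass _ hm1.1).2], (v1, b), hm1.1, Or.inl rfl⟩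
            · rw [min_eq_right hle, hF' (v2, b)]
              refine ⟨by simp [pvPass, hbm, (hGpass _ hm2.1).1], (v2, b - y), hm2.1,
                Or.inr (by simp)⟩
          · intro a ha
            rcases (hF' (a, b)).mp ha with ⟨hpt, s, hsG, hch | hch⟩
            · have := hbnd1 a s hsG hch
              have := min_le_left (v1 + x) v2
              omega
            · have := hbnd2 a s hsG hch
              have := min_le_right (v1 + x) v2
              omega
        · simp only [pvCand1, pvCand2, pvOmin, if_pos hv1, if_neg hbm]
          rw [pvGMin_some_iff]
          constructor
          · rw [hF' (v1 + x, b)]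
            exact ⟨by simp [pvPass, hv1, (hGpass _ hm1.1).2], (v1, b), hm1.1, Or.inl rfl⟩
          · intro a ha
            rcases (hF' (a, b)).mp ha with ⟨hpt, s, hsG, hch | hch⟩
            · exact hbnd1 a s hsG hch
            · have hpb : b < m := (hpp a b hpt).2
              exact absurd hpb hbm
      · by_cases hbm : b < m
        · simp only [pvCand1, pvCand2, pvOmin, if_neg hv1, if_pos hbm]
          rw [pvGMin_some_iff]
          constructor
          · rw [hF' (v2, b)]
            refine ⟨by simp [pvPass, hbm, (hGpass _ hm2.1).1], (v2, b - y), hm2.1,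
              Or.inr (by simp)⟩
          · intro a ha
            rcases (hF' (a, b)).mp ha with ⟨hpt, s, hsG, hch | hch⟩
            · have hpa : a < n := (hpp a b hpt).1
              have := hbnd1 a s hsG hch
              omega
            · exact hbnd2 a s hsG hch
        · simp only [pvCand1, pvCand2, pvOmin, if_neg hv1, if_neg hbm]
          rw [pvGMin_none_iff]
          intro a ha
          rcases (hF' (a, b)).mp ha with ⟨hpt, s, hsG, hch | hch⟩
          · have hpa : a < n := (hpp a b hpt).1
            have := hbnd1 a s hsG hch
            omega
          · have hpb : b < m := (hpp a b hpt).2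
            exact absurd hpb hbm

lemma pvOmin_none_right (o : Option Int) : pvOmin o none = o := by
  cases o <;> rfl

lemma pvFilter_nil_of_gmin_none (S : List (Int × Int)) (h : ∀ b, pvGMin S b = none) :
    S = [] := by
  apply List.eq_nil_iff_forall_not_mem.mpr
  intro s hs
  exact (pvGMin_none_iff S s.2).mp (h s.2) s.1 hs

-- one conditional min-insert of B's inner loop
lemma pvCondIns_get? (cnd : Prop) [Decidable cnd] (d : PySem.Dict Int Int) (k v b : Int) :
    (if cnd ∧ pvBetter d k v = true then d.insert k v else d).get? b
      = pvOmin (d.get? b) (if k = b ∧ cnd then some v else none) := by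
  by_cases hc : cnd
  · by_cases hkb : k = b
    · subst hkb
      cases hd : d.get? k with
      | none =>
        rw [if_pos ⟨hc, by simp [pvBetter, hd]⟩, PySem.Dict.get?_insert_self]
        simp [pvOmin, hc, hd]
      | some w =>
        by_cases hvw : v < w
        · rw [if_pos ⟨hc, by simp [pvBetter, hd, hvw]⟩, PySem.Dict.get?_insert_self]
          simp [pvOmin, hc, hd, min_eq_right (le_of_lt hvw)]
        · rw [if_neg (by simp [pvBetter, hd]; intro _; omega)]
          simp [pvOmin, hc, hd, min_eq_left (by omega : w ≤ v)]
    · have hne : ¬ (k = b ∧ cnd) := fun h => hkb h.1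
      by_cases hb2 : cnd ∧ pvBetter d k v = true
      · rw [if_pos hb2, PySem.Dict.get?_insert, if_neg (fun h => hkb h.symm), if_neg hne,
          pvOmin_none_right]
      · rw [if_neg hb2, if_neg hne, pvOmin_none_right]
  · have h1 : ¬ (cnd ∧ pvBetter d k v = true) := fun h => hc h.1
    have h2 : ¬ (k = b ∧ cnd) := fun h => hc h.2
    rw [if_neg h1, if_neg h2, pvOmin_none_right]

lemma pvStepOne_get? (n m x y : Int) (d : PySem.Dict Int Int) (bb aa b : Int) :
    (pvStepOne n m x y d (bb, aa)).get? b =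
      pvOmin (d.get? b)
        (pvOmin (if bb = b ∧ aa + x < n then some (aa + x) else none)
                (if bb + y = b ∧ b < m then some aa else none)) := by
  simp only [pvStepOne]
  rw [pvCondIns_get? (bb + y < m) _ (bb + y) aa b,
    pvCondIns_get? (aa + x < n) d bb (aa + x) b, pvOmin_assoc]
  congr 1
  congr 1
  by_cases hb : bb + y = b
  · rw [hb]
  · simp [hb]

lemma foldB_get? (n m x y : Int) :
    ∀ (items : List (Int × Int)) (d : PySem.Dict Int Int) (b : Int),
      (items.foldl (pvStepOne n m x y) d).get? b =
        pvOmin (d.get? b) (pvContr n m x y items b) := by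
  intro items
  induction items with
  | nil =>
    intro d b
    simp [pvContr, pvOmin_none_right]
  | cons p rest ih =>
    intro d b
    obtain ⟨bb, aa⟩ := p
    rw [List.foldl_cons, ih, pvStepOne_get?, pvContr]
    simp only [pvOmin_assoc]

lemma pvLk_eq_none (items : List (Int × Int)) (b : Int)
    (h : b ∉ items.map (fun p => p.1)) : pvLk items b = none := by
  induction items with
  | nil => rfl
  | cons p rest ih =>
    obtain ⟨k, v⟩ := p
    simp only [List.map_cons, List.mem_cons] at h
    rw [show pvLk ((k, v) :: rest) b = if k = b then some v else pvLk rest b from rfl,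
      if_neg (by tauto)]
    exact ih (by tauto)

lemma pvContr_lookup (n m x y : Int) :
    ∀ (items : List (Int × Int)) (b : Int), (items.map (fun p => p.1)).Nodup →
      pvContr n m x y items b =
        pvOmin (pvCand1 n x (pvLk items b)) (pvCand2 m b (pvLk items (b - y))) := by
  intro items
  induction items with
  | nil =>
    intro b _
    simp [pvContr, pvLk, pvCand1, pvCand2, pvOmin]
  | cons p rest ih =>
    intro b hnd
    obtain ⟨bb, aa⟩ := p
    simp only [List.map_cons, List.nodup_cons] at hnd
    have ihr := ih b hnd.2
    have hyb : (bb + y = b) ↔ (bb = b - y) := by omega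
    rw [pvContr, ihr]
    by_cases hb1 : bb = b
    · have hlk1 : pvLk ((bb, aa) :: rest) b = some aa := by simp [pvLk, hb1]
      have hlkr1 : pvLk rest b = none := pvLk_eq_none rest b (by rw [← hb1]; exact hnd.1)
      by_cases hb2 : bb = b - y
      · have hlk2 : pvLk ((bb, aa) :: rest) (b - y) = some aa := by simp [pvLk, hb2]
        have hlkr2 : pvLk rest (b - y) = none := pvLk_eq_none rest _ (by rw [← hb2]; exact hnd.1)
        rw [hlk1, hlk2, hlkr1, hlkr2]
        have hy0 : y = 0 := by omega
        subst hy0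
        simp only [pvCand1, pvCand2, pvOmin_none_right]
        split_ifs <;> simp_all [pvOmin] <;> omega
      · have hlk2 : pvLk ((bb, aa) :: rest) (b - y) = pvLk rest (b - y) := by
          simp [pvLk, hb2]
        rw [hlk1, hlk2, hlkr1]
        have hyb' : ¬ (bb + y = b) := by omega
        simp only [pvCand1, pvCand2, if_neg (by tauto : ¬ (bb + y = b ∧ b < m)),
          pvOmin_none_right]
        cases pvLk rest (b - y) <;> simp only [pvCand1, pvCand2, pvOmin] <;>
          split_ifs <;> simp_all [pvOmin] <;> omega
    · have hlk1 : pvLk ((bb, aa) :: rest) b = pvLk rest b := by simp [pvLk, hb1]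
      by_cases hb2 : bb = b - y
      · have hlk2 : pvLk ((bb, aa) :: rest) (b - y) = some aa := by simp [pvLk, hb2]
        have hlkr2 : pvLk rest (b - y) = none := pvLk_eq_none rest _ (by rw [← hb2]; exact hnd.1)
        rw [hlk1, hlk2, hlkr2]
        have hyb2 : bb + y = b := by omega
        simp only [pvCand1, pvCand2, if_neg (by tauto : ¬ (bb = b ∧ aa + x < n))]
        cases pvLk rest b <;> simp only [pvCand1, pvOmin] <;> split_ifs <;>
          simp_all [pvOmin, min_comm] <;> omega
      · have hlk2 : pvLk ((bb, aa) :: rest) (b - y) = pvLk rest (b - y) := by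
          simp [pvLk, hb2]
        rw [hlk1, hlk2]
        simp only [pvCand1, pvCand2,
          if_neg (by tauto : ¬ (bb = b ∧ aa + x < n)),
          if_neg (by omega : ¬ (bb + y = b ∧ b < m))]
        cases pvLk rest b <;> cases pvLk rest (b - y) <;>
          simp only [pvCand1, pvCand2, pvOmin] <;> split_ifs <;> simp [pvOmin]

lemma pvLk_items (d : PySem.Dict Int Int) (b : Int) : pvLk d.items b = d.get? b := by
  obtain ⟨l⟩ := d
  induction l with
  | nil => rfl
  | cons p t ih =>
    obtain ⟨k, v⟩ := p
    show pvLk ((k, v) :: t) b = _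
    rw [pvLk, PySem.Dict.get?_mk_cons]
    by_cases hk : k = b
    · simp [hk]
    · rw [if_neg hk, if_neg (by simpa using hk)]
      exact ih

lemma pvStepB_nodup (n m x y : Int) (dp : PySem.Dict Int Int) :
    (pvStepB n m x y dp).keys.Nodup := by
  rw [pvStepB]
  have hstep : ∀ (d : PySem.Dict Int Int) (p : Int × Int),
      d.keys.Nodup → (pvStepOne n m x y d p).keys.Nodup := by
    intro d p hd
    rw [pvStepOne]
    split_ifs with h1 h2 h3
    · exact PySem.Dict.nodup_keys_insert _ _ _ (PySem.Dict.nodup_keys_insert _ _ _ hd)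
    · exact PySem.Dict.nodup_keys_insert _ _ _ hd
    · exact PySem.Dict.nodup_keys_insert _ _ _ hd
    · exact hd
  have : ∀ (items : List (Int × Int)) (d : PySem.Dict Int Int),
      d.keys.Nodup → (items.foldl (pvStepOne n m x y) d).keys.Nodup := by
    intro items
    induction items with
    | nil => intro d hd; exact hd
    | cons p rest ih => intro d hd; exact ih _ (hstep d p hd)
  exact this _ _ PySem.Dict.nodup_keys_empty

lemma pvStepB_get? (n m x y : Int) (dp : PySem.Dict Int Int) (hnd : dp.keys.Nodup) (b : Int) :
    (pvStepB n m x y dp).get? b =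
      pvOmin (pvCand1 n x (dp.get? b)) (pvCand2 m b (dp.get? (b - y))) := by
  rw [pvStepB, foldB_get? n m x y dp.items PySem.Dict.empty b, PySem.Dict.get?_empty]
  rw [show pvOmin none (pvContr n m x y dp.items b) = pvContr n m x y dp.items b from rfl]
  rw [pvContr_lookup n m x y dp.items b (by simpa [PySem.Dict.keys] using hnd),
    pvLk_items, pvLk_items]

-- ---------- emptiness of a dict ----------
lemma dict_items_nil_iff (d : PySem.Dict Int Int) :
    d.items = [] ↔ ∀ b, d.get? b = none := by
  obtain ⟨l⟩ := d
  cases l with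
  | nil => exact ⟨fun _ b => rfl, fun _ => rfl⟩
  | cons p t =>
    obtain ⟨k, v⟩ := p
    constructor
    · intro h; exact nomatch h
    · intro h
      have := h k
      rw [PySem.Dict.get?_mk_cons] at this
      simp at this

-- ---------- B's outer loop invariant ----------
lemma pvLoopB_inv (n m : Int) :
    ∀ (rows : List (List Int)) (pend : List (Int × Int)) (dp : PySem.Dict Int Int),
      dp.keys.Nodup →
      (∀ b, dp.get? b = pvGMin (pend.filter (pvPass n m)) b) →
      (pvLoopB n m rows dp).keys.Nodup ∧
      ∀ b, (pvLoopB n m rows dp).get? b =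
        pvGMin ((pvPendAfter n m (pvRows rows) pend).filter (pvPass n m)) b := by
  intro rows
  induction rows with
  | nil =>
    intro pend dp hnd hg
    rw [pvLoopB]
    exact ⟨hnd, fun b => by rw [hg b]; rfl⟩
  | cons row rest ih =>
    intro pend dp hnd hg
    rw [pvLoopB]
    by_cases hemp : dp.items = []
    · rw [if_pos hemp]
      have hnone : ∀ b, dp.get? b = none := (dict_items_nil_iff dp).mp hemp
      have hfn : pend.filter (pvPass n m) = [] :=
        pvFilter_nil_of_gmin_none _ (fun b => by rw [← hg b]; exact hnone b)
      refine ⟨hnd, fun b => ?_⟩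
      rw [hnone b]
      have hPA : (pvPendAfter n m (pvRows (row :: rest)) pend).filter (pvPass n m) = [] := by
        apply pvPendAfter_nil
        exact hfn
      rw [hPA]
      rfl
    · rw [if_neg hemp]
      have hrows : pvRows (row :: rest)
          = (PySem.List.pyGetD row 0 0, PySem.List.pyGetD row 1 0) :: pvRows rest := by
        simp [pvRows]
      rw [hrows, pvPendAfter]
      exact ih (pvNextP n m (PySem.List.pyGetD row 0 0) (PySem.List.pyGetD row 1 0) pend)
        (pvStepB n m (PySem.List.pyGetD row 0 0) (PySem.List.pyGetD row 1 0) dp)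
        (pvStepB_nodup n m _ _ dp)
        (fun b => by
          rw [pvStepB_get? n m (PySem.List.pyGetD row 0 0) (PySem.List.pyGetD row 1 0) dp hnd b,
            hg b, hg (b - PySem.List.pyGetD row 1 0), ← pvGMin_next])

-- ---------- final min equality ----------
lemma pvValuesMin (F : List (Int × Int)) (d : PySem.Dict Int Int) (hnd : d.keys.Nodup)
    (hg : ∀ b, d.get? b = pvGMin F b) :
    d.values.min? = (F.map (fun s => s.1)).min? := by
  have hvals : d.values = d.items.map (fun p => p.2) := rfl
  cases hv : d.values.min? with
  | none =>
    rw [List.min?_eq_none_iff] at hv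
    have hitems : d.items = [] := by
      rw [hvals] at hv
      exact List.map_eq_nil_iff.mp hv
    have hnone : ∀ b, d.get? b = none := (dict_items_nil_iff d).mp hitems
    have hFnil : F = [] := pvFilter_nil_of_gmin_none F (fun b => by
      rw [← hg b]; exact hnone b)
    rw [hFnil]
    rfl
  | some v =>
    rcases List.min?_eq_some_iff_subtype.mp hv with ⟨hvmem, hvbound⟩
    symm
    rw [List.min?_eq_some_iff_subtype]
    constructor
    · -- v is a member of F.map fst
      rw [hvals] at hvmem
      rcases List.mem_map.mp hvmem with ⟨p, hpmem, hpv⟩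
      have hget : d.get? p.1 = some v := by
        apply PySem.Dict.get?_of_mem_items
        · rw [show (p.1, v) = p from by cases p; simp_all]
          exact hpmem
        · exact hnd
      have := (pvGMin_some_iff F p.1 v).mp (by rw [← hg p.1]; exact hget)
      exact List.mem_map.mpr ⟨(v, p.1), this.1, rfl⟩
    · -- v is a lower bound of F.map fst
      intro a ha
      rcases List.mem_map.mp ha with ⟨t, htF, hta⟩
      cases hgm : pvGMin F t.2 with
      | none =>
        exact absurd (by rw [show (t.1, t.2) = t from rfl]; exact htF)
          ((pvGMin_none_iff F t.2).mp hgm t.1)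
      | some g =>
        have hget : d.get? t.2 = some g := by rw [hg t.2]; exact hgm
        have hgval : g ∈ d.values := by
          rw [hvals]
          exact List.mem_map.mpr ⟨(t.2, g), PySem.Dict.mem_items_of_get?_eq_some d hget, rfl⟩
        have hvg : v ≤ g := hvbound g hgval
        have hga : g ≤ t.1 := ((pvGMin_some_iff F t.2 g).mp hgm).2 t.1
          (by rw [show (t.1, t.2) = t from rfl]; exact htF)
        omega

lemma pvSolutionA_eval (info : List (List Int)) (n m : Int) :
    solution info n m =
      match (((pvPendAfter n m (pvRows info) [((0 : Int), (0 : Int))]).filter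
          (pvPass n m)).map (fun s => s.1)).min? with
      | none => -1
      | some v => if n ≤ v then -1 else v := by
  have hbridge := pvLoopA_bridge info n m (pvRows info) 0 (by simp) (by omega)
    [((0 : Int), (0 : Int))] [] [] PySem.Set.empty [] (2 ^ info.length)
    (by intro a b; simp [PySem.Set.empty])
    (by intro c a b _ h; simp [PySem.Set.empty] at h)
    (fun _ => rfl)
    (by
      have := pvCost_le info.length 1 0
      simp only [Nat.sub_zero, List.length_cons, List.length_nil, Nat.zero_add] at this ⊢
      omega)
  simp only [List.map_cons, List.map_nil, List.append_nil, Nat.cast_zero,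
    List.nil_append] at hbridge
  rw [solution]
  rw [show ([((0 : Int), (0 : Int), (0 : Int))] : List (Int × Int × Int))
      = [((0 : Int), (0 : Int), (0 : Int))] ++ [] from by simp] at hbridge ⊢
  rw [hbridge, pvRunL_full, pymin_id]

theorem solution_spec : Claim_equal_solution := by
  unfold Claim_equal_solution
  intro info n m _hdom _hpre
  unfold Spec_solution
  rw [pvSolutionA_eval]
  by_cases hnm : n ≤ 0 ∨ m ≤ 0
  · -- the root state is pruned immediately on both sides
    rw [solution_alt, if_pos hnm]
    have hf0 : ([((0 : Int), (0 : Int))] : List (Int × Int)).filter (pvPass n m) = [] := by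
      simp [pvPass]
      omega
    rw [pvPendAfter_nil n m (pvRows info) _ hf0]
    rfl
  · have hnm2 : 0 < n ∧ 0 < m := by
      constructor <;> by_contra h <;> exact hnm (by omega)
    clear hnm
    obtain ⟨hn1, hm1⟩ := hnm2
    rw [solution_alt, if_neg (by omega)]
    have hf0 : ([((0 : Int), (0 : Int))] : List (Int × Int)).filter (pvPass n m)
        = [((0 : Int), (0 : Int))] := by
      simp [pvPass]
      omega
    have hnd0 : ((PySem.Dict.empty : PySem.Dict Int Int).insert 0 0).keys.Nodup :=
      PySem.Dict.nodup_keys_insert _ _ _ PySem.Dict.nodup_keys_empty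
    have hg0 : ∀ b, ((PySem.Dict.empty : PySem.Dict Int Int).insert 0 0).get? b
        = pvGMin (([((0 : Int), (0 : Int))] : List (Int × Int)).filter (pvPass n m)) b := by
      intro b
      rw [hf0, PySem.Dict.get?_insert]
      by_cases hb : b = 0
      · simp [hb, pvGMin]
      · have h0b : ¬ ((0 : Int) = b) := fun h => hb h.symm
        simp [hb, pvGMin, h0b, PySem.Dict.get?_empty]
    obtain ⟨hndF, hgF⟩ := pvLoopB_inv n m info [((0 : Int), (0 : Int))]
      ((PySem.Dict.empty : PySem.Dict Int Int).insert 0 0) hnd0 hg0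
    set dpF := pvLoopB n m info ((PySem.Dict.empty : PySem.Dict Int Int).insert 0 0) with hdpF
    set F := (pvPendAfter n m (pvRows info) [((0 : Int), (0 : Int))]).filter (pvPass n m)
      with hFdef
    by_cases hemp : dpF.items = []
    · rw [if_pos hemp]
      have hnone : ∀ b, dpF.get? b = none := (dict_items_nil_iff dpF).mp hemp
      have hFnil : F = [] := pvFilter_nil_of_gmin_none F (fun b => by
        rw [← hgF b]; exact hnone b)
      rw [hFnil]
      rfl
    · rw [if_neg hemp]
      have hmin : dpF.values.min? = (F.map (fun s => s.1)).min? :=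
        pvValuesMin F dpF hndF hgF
      rw [pymin_id, hmin]
      cases hFm : (F.map (fun s => s.1)).min? with
      | none => rfl
      | some v =>
        rcases List.min?_eq_some_iff_subtype.mp hFm with ⟨hvmem, _⟩
        rcases List.mem_map.mp hvmem with ⟨t, htF, hta⟩
        have htp : pvPass n m t = true := (List.mem_filter.mp (by rw [hFdef] at htF; exact htF)).2
        have hvn : v < n := by
          have := (by simpa [pvPass] using htp : t.1 < n ∧ t.2 < m).1
          omega
        change (if n ≤ v then (-1 : Int) else v) = v
        rw [if_neg (by omega)]
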